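-- pv_equiv track=rewrite | github.com/pypi-data/pypi-mirror-224 | packages/vinhvh-package/vinhvh_package-0.0.17-py3-none-any.whl/vinhvh_package/map.py | check_sector
-- ===== SOURCE A (Python) =====
-- def check_sector(x):
--     if len(x) in range(7,11):
--         check =  x[-1:]
--     elif len(x) == 11:
--         check = x[6]
--     else:
--         check = 'other'
--     sector_types = {
--         'Sector 1': ['A', 'D', 'G', 'J', 'M', 'P'],
--         'Sector 2': ['B', 'E', 'H', 'K', 'N', 'Q'],
--         'Sector 3': ['C', 'F', 'I', 'L', 'O', 'R']
--
--     }
--     for sector_type, codes in sector_types.items():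
--         if check in codes:
--             return sector_type
--     return 'Other'
-- ===== SOURCE B (Python) =====
-- # Closed-form classification: same length-based char extraction, then arithmetic
-- # (ord mod 3) instead of a three-list table scan. Objective: simpler.
-- def _classify(c):
--     if 'A' <= c <= 'R':
--         return 'Sector ' + str((ord(c) - ord('A')) % 3 + 1)
--     return 'Other'
--
--
-- def check_sector(x):
--     n = len(x)
--     if 7 <= n <= 10:
--         c = x[-1]
--     elif n == 11:
--         c = x[6]
--     else:
--         return 'Other'
--     return _classify(c)
-- ===== Notes on version B (the rewrite author's own statement) =====
-- stated objective: simpler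
-- what changed: The three-list sector table and its membership scan are replaced by a closed-form rule: one bounds check that the extracted character is among the first eighteen uppercase letters, and the sector number computed arithmetically from its code point modulo three.
import Mathlib
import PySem

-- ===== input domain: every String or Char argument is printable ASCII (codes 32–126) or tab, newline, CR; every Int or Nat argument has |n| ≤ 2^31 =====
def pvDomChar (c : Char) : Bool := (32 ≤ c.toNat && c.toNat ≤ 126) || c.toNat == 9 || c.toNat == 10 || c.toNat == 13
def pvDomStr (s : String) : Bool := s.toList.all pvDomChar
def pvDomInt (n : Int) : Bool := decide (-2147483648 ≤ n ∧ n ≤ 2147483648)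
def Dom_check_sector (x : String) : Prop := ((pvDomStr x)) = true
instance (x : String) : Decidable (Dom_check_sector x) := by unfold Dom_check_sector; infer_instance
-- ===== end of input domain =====

-- B replaces A's three-list sector table and membership scan by a closed-form
-- arithmetic classification ('A' ≤ c ≤ 'R', sector = (ord c - ord 'A') % 3 + 1); simpler.

-- ===== PORT A =====
-- the dict-iteration loop of A ('for sector_type, codes in sector_types.items(): if check in codes: return sector_type'),
-- kept as a helper: first matching entry of the table, else 'Other'
def pvLookupA (check : List Char) : String :=
  let sector_types : List (String × List (List Char)) :=
    [("Sector 1", [['A'],['D'],['G'],['J'],['M'],['P']]),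
     ("Sector 2", [['B'],['E'],['H'],['K'],['N'],['Q']]),
     ("Sector 3", [['C'],['F'],['I'],['L'],['O'],['R']])]
  match sector_types.find? (fun p => check ∈ p.2) with
  | some p => p.1
  | none => "Other"

def check_sector (x : String) : String :=
  let cs := x.toList
  let check : List Char :=
    if ((cs.length : Int)) ∈ PySem.List.pyRange 7 11 1 then
      PySem.Chars.slice cs (some (-1)) none            -- x[-1:]
    else if cs.length = 11 then
      match PySem.List.pyGet? cs 6 with                -- x[6]; in range since len = 11
      | some c => [c]
      | none => []
    else "other".toList
  pvLookupA check

-- ===== PORT B =====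
-- Source B's _classify helper
def pvClassifyB (c : Char) : String :=
  if 'A' ≤ c ∧ c ≤ 'R' then
    String.ofList ("Sector ".toList ++ PySem.Int.toChars (PySem.Int.mod ((c.toNat : Int) - 65) 3 + 1))
  else "Other"

def check_sector_alt (x : String) : String :=
  let cs := x.toList
  let n := cs.length
  let c? : Option Char :=
    if 7 ≤ n ∧ n ≤ 10 then PySem.List.pyGet? cs (-1)
    else if n = 11 then PySem.List.pyGet? cs 6
    else none
  match c? with
  | none => "Other"
  | some c => pvClassifyB c

-- ===== PRECONDITION & SPEC =====
def Spec_check_sector (x : String) (out : String) : Prop := out = check_sector_alt x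
instance (x : String) (out : String) : Decidable (Spec_check_sector x out) := by unfold Spec_check_sector; infer_instance

-- ===== CLAIM (what is proved, stated in full; the proofs are below) =====
def Claim_equal_check_sector : Prop := ∀ (x : String), Dom_check_sector x → Spec_check_sector x (check_sector x)

-- ===== LEMMAS AND PROOFS =====

lemma pv_char_eq_of_toNat (c : Char) (n : Nat) (h : c.toNat = n) : c = Char.ofNat n := by
  rw [← h, Char.ofNat_toNat]

-- table scan = closed-form classification, for a single character
lemma pv_key (c : Char) : pvLookupA [c] = pvClassifyB c := by
  by_cases h : 'A' ≤ c ∧ c ≤ 'R'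
  · obtain ⟨h1, h2⟩ := h
    have h1' : 65 ≤ c.toNat := h1
    have h2' : c.toNat ≤ 82 := h2
    interval_cases hn : c.toNat <;>
      (rw [pv_char_eq_of_toNat c _ hn]; decide)
  · have hne : ∀ (d : Char), 'A' ≤ d → d ≤ 'R' → c ≠ d := fun d h1 h2 he => h (he ▸ ⟨h1, h2⟩)
    simp only [pvLookupA, pvClassifyB, if_neg h]
    rw [List.find?_eq_none.mpr ?_]
    intro p hp
    fin_cases hp <;>
      simp [hne 'A' (by decide) (by decide), hne 'B' (by decide) (by decide),
        hne 'C' (by decide) (by decide), hne 'D' (by decide) (by decide),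
        hne 'E' (by decide) (by decide), hne 'F' (by decide) (by decide),
        hne 'G' (by decide) (by decide), hne 'H' (by decide) (by decide),
        hne 'I' (by decide) (by decide), hne 'J' (by decide) (by decide),
        hne 'K' (by decide) (by decide), hne 'L' (by decide) (by decide),
        hne 'M' (by decide) (by decide), hne 'N' (by decide) (by decide),
        hne 'O' (by decide) (by decide), hne 'P' (by decide) (by decide),
        hne 'Q' (by decide) (by decide), hne 'R' (by decide) (by decide)]

-- ===== VERDICT (by name: the statement is the Claim_ definition above) =====
theorem check_sector_spec : Claim_equal_check_sector := by
  intro x _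
  simp only [Spec_check_sector, check_sector, check_sector_alt]
  set cs := x.toList with hcs
  by_cases h7 : 7 ≤ cs.length ∧ cs.length ≤ 10
  · have hmem : ((cs.length : Int)) ∈ PySem.List.pyRange 7 11 1 := by
      rw [PySem.List.mem_pyRange_one]; omega
    rw [if_pos hmem, if_pos h7]
    -- last element: cs = l ++ [c]
    rcases List.eq_nil_or_concat cs with hnil | ⟨l, c, hcat⟩
    · rw [hnil] at h7; simp at h7
    · rw [List.concat_eq_append] at hcat
      rw [hcat]
      rw [PySem.Chars.slice_eq_listSlice, PySem.List.slice_from_neg_one]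
      have hdrop : (l ++ [c]).drop ((l ++ [c]).length - 1) = [c] := by
        simp
      have hget : PySem.List.pyGet? (l ++ [c]) (-1) = some c := by
        simp [PySem.List.pyGet?, PySem.List.pyIdx?]
      rw [hdrop, hget]
      exact pv_key c
  · have hmem : ¬ ((cs.length : Int)) ∈ PySem.List.pyRange 7 11 1 := by
      rw [PySem.List.mem_pyRange_one]; omega
    rw [if_neg hmem, if_neg h7]
    by_cases h11 : cs.length = 11
    · rw [if_pos h11, if_pos h11]
      cases hg : PySem.List.pyGet? cs 6 with
      | none => decide
      | some c => exact pv_key c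
    · rw [if_neg h11, if_neg h11]
      decide
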